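-- pv_equiv track=rewrite | github.com/sqrtxander/adventofcode | 2019/day04/python/part2.py | double_letter
-- ===== SOURCE A (Python) =====
-- def double_letter(num):
--     number_str = str(num)
--     last_digit = number_str[0]
--     group_len = 1
--     for digit in number_str[1:]:
--         if digit == last_digit:
--             group_len += 1
--         else:
--             if group_len == 2:
--                 return True
--             last_digit = digit
--             group_len = 1
--     return group_len == 2
-- ===== SOURCE B (Python) =====
-- def double_letter(num):
--     s = str(num)
--     n = len(s)
--     # positional window scan: an isolated adjacent equal pair, i.e. s[i] == s[i+1]
--     # whose neighbours (if any) differ, is exactly a run of length two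
--     return any(
--         s[i] == s[i + 1]
--         and (i == 0 or s[i - 1] != s[i])
--         and (i + 2 == n or s[i + 2] != s[i + 1])
--         for i in range(n - 1)
--     )
-- ===== Notes on version B (the rewrite author's own statement) =====
-- stated objective: alternative
-- what changed: Replaced A's sequential run-length state machine (last_digit/group_len with early return) by a stateless positional window scan: for each index i test whether s[i]==s[i+1] is an isolated pair, i.e. neighbours on both sides (when they exist) differ.
import Mathlib
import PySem

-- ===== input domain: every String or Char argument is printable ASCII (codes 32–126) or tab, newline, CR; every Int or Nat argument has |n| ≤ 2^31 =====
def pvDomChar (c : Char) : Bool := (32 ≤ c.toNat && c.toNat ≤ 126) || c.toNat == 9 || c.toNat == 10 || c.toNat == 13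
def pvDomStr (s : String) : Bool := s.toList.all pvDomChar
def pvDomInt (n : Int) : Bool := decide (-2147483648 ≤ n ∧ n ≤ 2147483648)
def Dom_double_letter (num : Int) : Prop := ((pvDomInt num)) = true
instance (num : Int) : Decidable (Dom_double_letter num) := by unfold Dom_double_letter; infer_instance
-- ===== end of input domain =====

-- B replaces A's sequential run-length state machine with a stateless positional window
-- scan: any index i where s[i] == s[i+1] is an isolated pair (neighbours, if any, differ).

-- ===== PORT A =====
-- the for-loop over number_str[1:], carrying (last_digit, group_len); early `return True` = result true
def pvLoopA (last : Char) (glen : Nat) : List Char → Bool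
  | [] => glen == 2
  | d :: rest =>
    if d == last then pvLoopA last (glen + 1) rest
    else if glen == 2 then true
    else pvLoopA d 1 rest

def double_letter (num : Int) : Bool :=
  match (PySem.Int.toStr num).toList with
  | [] => false          -- unreachable: str(num) is never empty (number_str[0] always succeeds)
  | c :: cs => pvLoopA c 1 cs

-- ===== PORT B =====
-- any(s[i]==s[i+1] and (i==0 or s[i-1]!=s[i]) and (i+2==n or s[i+2]!=s[i+1]) for i in range(n-1))
def double_letter_alt (num : Int) : Bool :=
  let l := (PySem.Int.toStr num).toList
  let n := l.length
  (List.range (n - 1)).any (fun i =>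
    (l[i]? == l[i+1]?) &&
    ((i == 0) || (l[i-1]? != l[i]?)) &&
    (decide (i + 2 = n) || (l[i+2]? != l[i+1]?)))

-- ===== PRECONDITION & SPEC =====
def Spec_double_letter (num : Int) (out : Bool) : Prop := out = double_letter_alt num
instance (num : Int) (out : Bool) : Decidable (Spec_double_letter num out) := by unfold Spec_double_letter; infer_instance

-- ===== CLAIM (what is proved, stated in full; the proofs are below) =====
def Claim_equal_double_letter : Prop := ∀ (num : Int), Dom_double_letter num → Spec_double_letter num (double_letter num)

-- ===== LEMMAS AND PROOFS =====

-- bridging state machine: previous character (none at the start), scanning pairs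
def pvG (prev : Option Char) : List Char → Bool
  | a :: b :: r => ((a == b) && (prev != some a) && (r.head? != some a)) || pvG (some a) (b :: r)
  | _ => false

-- the window predicate with an explicit "previous character" parameter
def pvW (prev : Option Char) (t : List Char) (i : Nat) : Bool :=
  (t[i]? == t[i+1]?) &&
  (if i == 0 then prev != t[0]? else (t[i-1]? != t[i]?)) &&
  (decide (i + 2 = t.length) || (t[i+2]? != t[i+1]?))

theorem pv_any_congr {α : Type} (l : List α) (f g : α → Bool) (h : ∀ x, f x = g x) :
    l.any f = l.any g := by
  induction l with
  | nil => rfl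
  | cons a l ih => simp [List.any_cons, h a, ih]

theorem pvG_prev_congr (r : List Char) (a : Char) (p q : Option Char)
    (h : (p == some a) = (q == some a)) : pvG p (a :: r) = pvG q (a :: r) := by
  cases r with
  | nil => simp [pvG]
  | cons b rb => simp only [pvG, bne, h]

theorem loopA_eq_pvG : ∀ (rest : List Char) (last : Char) (glen : Nat), 1 ≤ glen →
    pvLoopA last glen rest =
      (((glen == 2) && (rest.head? != some last)) ||
        pvG (if 2 ≤ glen then some last else none) (last :: rest)) := by
  intro rest
  induction rest with
  | nil =>
    intro last glen _
    simp [pvLoopA, pvG]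
  | cons d rest ih =>
    intro last glen hg
    by_cases hd : d = last
    · subst hd
      have h1 : pvLoopA d glen (d :: rest) = pvLoopA d (glen + 1) rest := by
        simp [pvLoopA]
      rw [h1, ih d (glen + 1) (by omega)]
      rcases glen with _ | _ | g
      · omega
      · simp [pvG, show (none != some d) = true from rfl]
      · simp [pvG, show 2 ≤ g + 2 by omega, show 2 ≤ g + 1 + 1 + 1 by omega]
    · have hdl : last ≠ d := Ne.symm hd
      have hbd : (d == last) = false := by simp [hd]
      by_cases h2 : glen = 2
      · subst h2
        simp [pvLoopA, pvG, hbd, hd]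
      · have h3 : (glen == 2) = false := by simp [h2]
        have h4 : pvLoopA last glen (d :: rest) = pvLoopA d 1 rest := by
          simp [pvLoopA, hbd, h3]
        have h7 : pvLoopA d 1 rest = pvG none (d :: rest) := by
          rw [ih d 1 (by omega)]
          norm_num
        have h5 : pvG (if 2 ≤ glen then some last else none) (last :: d :: rest)
            = pvG (some last) (d :: rest) := by
          by_cases h6 : 2 ≤ glen <;> simp [pvG, h6, hdl]
        rw [h4, h7, h3, h5]
        simp only [Bool.false_and, Bool.false_or]
        exact pvG_prev_congr rest d none (some last) (by simp [hdl])

theorem pvG_eq_window : ∀ (t : List Char) (prev : Option Char),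
    pvG prev t = (List.range (t.length - 1)).any (pvW prev t) := by
  intro t
  induction t with
  | nil => intro prev; simp [pvG]
  | cons a t ih =>
    intro prev
    cases t with
    | nil => simp [pvG]
    | cons b r =>
      have key0 : pvW prev (a :: b :: r) 0 = ((a == b) && (prev != some a) && (r.head? != some a)) := by
        by_cases hab : a = b
        · subst hab
          cases r with
          | nil => simp [pvW]
          | cons c rc => simp [pvW]
        · simp [pvW, beq_eq_false_iff_ne.mpr hab]
      have keyS : ∀ i, pvW prev (a :: b :: r) (i + 1) = pvW (some a) (b :: r) i := by
        intro i
        cases i with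
        | zero =>
          simp only [pvW]
          rw [show (decide (0 + 1 + 2 = (a :: b :: r).length)) = (decide (0 + 2 = (b :: r).length))
            from decide_eq_decide.mpr (by simp)]
          simp
        | succ j =>
          simp only [pvW]
          rw [show (decide (j + 1 + 1 + 2 = (a :: b :: r).length)) = (decide (j + 1 + 2 = (b :: r).length))
            from decide_eq_decide.mpr (by simp)]
          simp
      have ih' := ih (some a)
      rw [show (b :: r).length - 1 = r.length from by simp] at ih'
      have hrange : List.range ((a :: b :: r).length - 1) = 0 :: (List.range r.length).map Nat.succ := by
        have hl : (a :: b :: r).length - 1 = r.length + 1 := by simp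
        rw [hl, List.range_succ_eq_map]
      have hfun : (pvW prev (a :: b :: r)) ∘ Nat.succ = pvW (some a) (b :: r) := by
        funext i; exact keyS i
      rw [hrange, List.any_cons, List.any_map, hfun, key0, ← ih']
      simp [pvG]

-- the port's inline predicate agrees pointwise with pvW none on a nonempty list
theorem window_none_eq (c : Char) (cs : List Char) (i : Nat) :
    pvW none (c :: cs) i =
      (((c :: cs)[i]? == (c :: cs)[i+1]?) &&
       ((i == 0) || ((c :: cs)[i-1]? != (c :: cs)[i]?)) &&
       (decide (i + 2 = (c :: cs).length) || ((c :: cs)[i+2]? != (c :: cs)[i+1]?))) := by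
  cases i with
  | zero => simp [pvW, show ((none : Option Char) != some c) = true from rfl]
  | succ j => simp [pvW]

-- ===== VERDICT (by name: the statement is the Claim_ definition above) =====
theorem double_letter_spec : Claim_equal_double_letter := by
  intro num _
  unfold Spec_double_letter double_letter double_letter_alt
  cases h : (PySem.Int.toStr num).toList with
  | nil => rfl
  | cons c cs =>
    show pvLoopA c 1 cs = (List.range ((c :: cs).length - 1)).any (fun i =>
      ((c :: cs)[i]? == (c :: cs)[i+1]?) &&
      ((i == 0) || ((c :: cs)[i-1]? != (c :: cs)[i]?)) &&
      (decide (i + 2 = (c :: cs).length) || ((c :: cs)[i+2]? != (c :: cs)[i+1]?)))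
    rw [loopA_eq_pvG cs c 1 (by omega), if_neg (by omega : ¬ (2:Nat) ≤ 1)]
    simp only [show ((1:Nat) == 2) = false from rfl, Bool.false_and, Bool.false_or]
    rw [pvG_eq_window (c :: cs) none]
    exact pv_any_congr _ _ _ (window_none_eq c cs)
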